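-- pv_equiv track=rewrite | github.com/JawadKotaichh/Codeforces | Divisions/Div 3/Div 3 1043/D.py | compute_res
-- ===== SOURCE A (Python) =====
-- def compute_res(num: int, pref1):
--     d = str(num)
--     D = len(d)
--     # Precompute powers of 10 up to D
--     pow10 = [1] * (D + 1)
--     for t in range(1, D + 1):
--         pow10[t] = pow10[t - 1] * 10
--
--     res = 0
--
--     # First double loop     # i = 1..9
--     for j in range(0, D):
--         for dig in range(1, 10):  # j = 0..D-1
--             x = D - 1 - j
--             dj = int(d[j])
--             res += (pref1[x] * dj + pow10[x] * (1 if dig < dj else 0)) * dig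
--
--     # Second loop
--     for j in range(0, D - 1):  # j = 0..D-2
--         left_digit = int(d[j])
--         tail = int(d[j + 1 :]) + 1 if j + 1 < D else 0
--         res += tail * left_digit
--
--     # Final add
--     res += int(d[-1])
--
--     return res
-- ===== SOURCE B (Python) =====
-- def compute_res(num: int, pref1):
--     # One right-to-left pass over the digits: the suffix value and the power of
--     # ten are maintained incrementally, and the inner 1..9 loop of A is replaced
--     # by its closed form (sum of dig for dig < dj is dj*(dj-1)//2, sum of dig is 45).
--     res = 0
--     suffix = 0  # numeric value of the digits already processed (to the right)
--     p = 1       # 10**x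
--     x = 0       # position from the right
--     for c in reversed(str(num)):
--         dj = ord(c) - 48
--         res += 45 * pref1[x] * dj + p * (dj * (dj - 1) // 2) + (suffix + 1) * dj
--         suffix += dj * p
--         p *= 10
--         x += 1
--     return res
-- ===== Notes on version B (the rewrite author's own statement) =====
-- stated objective: alternative
-- what changed: One right-to-left pass that maintains the suffix value and power of ten incrementally, replacing A's per-position re-parse of the suffix slice int(d[j+1:]) and A's inner 1..9 digit loop (collapsed to its closed form dj*(dj-1)//2 and the constant 45).
import Mathlib
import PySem

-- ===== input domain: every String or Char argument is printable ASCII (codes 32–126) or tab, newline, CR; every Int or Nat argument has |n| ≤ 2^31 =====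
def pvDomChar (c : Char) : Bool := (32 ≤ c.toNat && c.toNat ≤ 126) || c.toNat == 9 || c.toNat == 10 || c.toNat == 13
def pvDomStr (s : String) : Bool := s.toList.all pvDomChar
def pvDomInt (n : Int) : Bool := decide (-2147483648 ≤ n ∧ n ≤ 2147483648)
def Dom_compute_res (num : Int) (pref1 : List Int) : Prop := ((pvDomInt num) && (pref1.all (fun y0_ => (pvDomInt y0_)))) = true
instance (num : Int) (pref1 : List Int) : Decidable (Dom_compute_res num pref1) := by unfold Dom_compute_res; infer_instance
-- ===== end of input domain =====

-- B restates A as one right-to-left pass over the digits, maintaining the suffix value and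
-- power of ten incrementally instead of re-parsing int(d[j+1:]) at each position, and with
-- A's inner 1..9 loop collapsed to its closed form.

-- Shared digit helpers: value of an ASCII digit char (ord(c) - 48), and the value of a
-- big-endian digit string (the usual fold).
def pvDigitVal (c : Char) : Int := (c.toNat : Int) - 48
def pvStrVal (cs : List Char) : Int := cs.foldl (fun a c => a * 10 + pvDigitVal c) 0

-- Hand port of Python's int(s) for the strings reachable in A: every argument of int()
-- in A is a slice of str(num), i.e. a (possibly empty) string of ASCII digits, optionally
-- starting with '-' (when num < 0). On digit-only nonempty strings int returns their value;
-- on the empty string or one containing '-' it raises ValueError (= none here). Exact there.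
def pvParseDigits? (cs : List Char) : Option Int :=
  if cs ≠ [] ∧ cs.all Char.isDigit then some (pvStrVal cs) else none

-- ===== PORT A =====
-- Literal transliteration of A, body parametrised by d = str(num) (as a char list).
def pvACore (d : List Char) (pref1 : List Int) : Int :=
  let D := d.length
  -- pow10 = [1] * (D + 1); for t in range(1, D + 1): pow10[t] = pow10[t - 1] * 10
  let pow10 := (PySem.List.pyRange 1 ((D : Int) + 1)).foldl
    (fun acc t => PySem.List.pySetD acc t (PySem.List.pyGetD acc (t - 1) 0 * 10))
    (List.replicate (D + 1) (1 : Int))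
  -- first double loop
  let res1 := (PySem.List.pyRange 0 (D : Int)).foldl (fun res j =>
    (PySem.List.pyRange 1 10).foldl (fun res dig =>
      let x := (D : Int) - 1 - j
      let dj := (pvParseDigits? [PySem.List.pyGetD d j ' ']).getD 0
      res + (PySem.List.pyGetD pref1 x 0 * dj
             + PySem.List.pyGetD pow10 x 0 * (if dig < dj then 1 else 0)) * dig) res) 0
  -- second loop
  let res2 := (PySem.List.pyRange 0 ((D : Int) - 1)).foldl (fun res j =>
    let left_digit := (pvParseDigits? [PySem.List.pyGetD d j ' ']).getD 0
    let tail := if j + 1 < (D : Int)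
      then (pvParseDigits? (PySem.List.slice d (some (j + 1)) none)).getD 0 + 1 else 0
    res + tail * left_digit) res1
  -- final add: res += int(d[-1])
  res2 + (pvParseDigits? [PySem.List.pyGetD d (-1) ' ']).getD 0

def compute_res (num : Int) (pref1 : List Int) : Int :=
  pvACore (PySem.Int.toChars num) pref1

-- ===== PORT B =====
-- Literal transliteration of B: one fold over reversed(str(num)) with state
-- (res, suffix, p, x); dj*(dj-1)//2 is Python floor division.
def pvBCore (d : List Char) (pref1 : List Int) : Int :=
  (d.reverse.foldl
    (fun (st : Int × Int × Int × Int) c =>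
      let res := st.1
      let suffix := st.2.1
      let p := st.2.2.1
      let x := st.2.2.2
      let dj := pvDigitVal c
      (res + 45 * PySem.List.pyGetD pref1 x 0 * dj
           + p * PySem.Int.floordiv (dj * (dj - 1)) 2
           + (suffix + 1) * dj,
       suffix + dj * p, p * 10, x + 1))
    (0, 0, 1, 0)).1

def compute_res_alt (num : Int) (pref1 : List Int) : Int :=
  pvBCore (PySem.Int.toChars num) pref1

-- ===== PRECONDITION & SPEC =====
-- Exactly A's return domain: A raises ValueError on num < 0 (int of a slice containing '-')
-- and IndexError (pref1[x]) when pref1 has fewer entries than num has digits, i.e. unless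
-- num < 10^len(pref1) with pref1 nonempty.
def Pre_compute_res (num : Int) (pref1 : List Int) : Prop :=
  0 ≤ num ∧ pref1 ≠ [] ∧ num < 10 ^ pref1.length
instance (num : Int) (pref1 : List Int) : Decidable (Pre_compute_res num pref1) := by
  unfold Pre_compute_res; infer_instance

def pvWitness_compute_res : Int × List Int := (5, [0])

def Spec_compute_res (num : Int) (pref1 : List Int) (out : Int) : Prop := out = compute_res_alt num pref1
instance (num : Int) (pref1 : List Int) (out : Int) : Decidable (Spec_compute_res num pref1 out) := by unfold Spec_compute_res; infer_instance

-- ===== CLAIM (what is proved, stated in full; the proofs are below) =====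
def Claim_equal_compute_res : Prop := ∀ (num : Int) (pref1 : List Int), Dom_compute_res num pref1 → Pre_compute_res num pref1 → Spec_compute_res num pref1 (compute_res num pref1)

-- ===== LEMMAS AND PROOFS =====

-- T(e) = sum of dig for 1 ≤ dig < e (for e a digit) = e*(e-1)//2.
def pvT (e : Int) : Int := PySem.Int.floordiv (e * (e - 1)) 2

-- Common reference value, by recursion on the digit list.
def pvR (pref1 : List Int) : List Char → Int
  | [] => 0
  | c :: cs =>
      45 * pref1.getD cs.length 0 * pvDigitVal c
      + 10 ^ cs.length * pvT (pvDigitVal c)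
      + (pvStrVal cs + 1) * pvDigitVal c
      + pvR pref1 cs

theorem pvStrVal_foldl_acc (cs : List Char) : ∀ a : Int,
    cs.foldl (fun a c => a * 10 + pvDigitVal c) a = a * 10 ^ cs.length + pvStrVal cs := by
  induction cs with
  | nil => intro a; simp [pvStrVal]
  | cons c cs ih =>
      intro a
      have h1 := ih (a * 10 + pvDigitVal c)
      have h2 := ih (0 * 10 + pvDigitVal c)
      simp only [List.foldl_cons, pvStrVal] at *
      rw [h1, h2]
      simp only [List.length_cons, pow_succ]
      ring

theorem pvStrVal_cons (c : Char) (cs : List Char) :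
    pvStrVal (c :: cs) = pvDigitVal c * 10 ^ cs.length + pvStrVal cs := by
  have := pvStrVal_foldl_acc cs (0 * 10 + pvDigitVal c)
  simp only [pvStrVal, List.foldl_cons] at *
  rw [this]; ring

theorem pvDigitVal_bounds (c : Char) (h : c.isDigit = true) :
    0 ≤ pvDigitVal c ∧ pvDigitVal c ≤ 9 := by
  have h' : 48 ≤ c.toNat ∧ c.toNat ≤ 57 := by
    simpa [Char.isDigit, Char.le_def] using h
  unfold pvDigitVal
  omega

-- B's fold computes (pvR, value, 10^len, len) — unconditionally.
theorem pvB_state (pref1 : List Int) (d : List Char) :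
    d.reverse.foldl
      (fun (st : Int × Int × Int × Int) c =>
        let res := st.1
        let suffix := st.2.1
        let p := st.2.2.1
        let x := st.2.2.2
        let dj := pvDigitVal c
        (res + 45 * PySem.List.pyGetD pref1 x 0 * dj
             + p * PySem.Int.floordiv (dj * (dj - 1)) 2
             + (suffix + 1) * dj,
         suffix + dj * p, p * 10, x + 1))
      (0, 0, 1, 0)
    = (pvR pref1 d, pvStrVal d, 10 ^ d.length, (d.length : Int)) := by
  induction d with
  | nil => simp [pvR, pvStrVal]
  | cons c cs ih =>
      rw [List.reverse_cons, List.foldl_append, ih]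
      simp only [List.foldl_cons, List.foldl_nil]
      refine Prod.ext ?_ (Prod.ext ?_ (Prod.ext ?_ ?_)) <;>
        simp [pvR, pvT, pvStrVal_cons, PySem.List.pyGetD_natCast, pow_succ] <;> ring

theorem pvBCore_eq_R (pref1 : List Int) (d : List Char) : pvBCore d pref1 = pvR pref1 d := by
  unfold pvBCore
  rw [pvB_state]

-- A's indexed sums.
def pvSA (pref1 : List Int) (d : List Char) : Int :=
  (∑ k ∈ Finset.range d.length,
      (45 * pref1.getD (d.length - 1 - k) 0 * pvDigitVal (d.getD k ' ')
        + 10 ^ (d.length - 1 - k) * pvT (pvDigitVal (d.getD k ' '))))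
  + (∑ k ∈ Finset.range (d.length - 1),
      (pvStrVal (d.drop (k + 1)) + 1) * pvDigitVal (d.getD k ' '))
  + pvDigitVal (d.getLastD '0')

theorem pvSA_cons (pref1 : List Int) (c c' : Char) (cs : List Char) :
    pvSA pref1 (c :: c' :: cs) =
      45 * pref1.getD (cs.length + 1) 0 * pvDigitVal c
      + 10 ^ (cs.length + 1) * pvT (pvDigitVal c)
      + (pvStrVal (c' :: cs) + 1) * pvDigitVal c
      + pvSA pref1 (c' :: cs) := by
  unfold pvSA
  simp only [List.length_cons, Nat.add_sub_cancel]
  rw [Finset.sum_range_succ' (fun k =>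
        45 * pref1.getD (cs.length + 1 - k) 0 * pvDigitVal ((c :: c' :: cs).getD k ' ')
        + 10 ^ (cs.length + 1 - k) * pvT (pvDigitVal ((c :: c' :: cs).getD k ' '))) (cs.length + 1),
      Finset.sum_range_succ' (fun k =>
        (pvStrVal ((c :: c' :: cs).drop (k + 1)) + 1) * pvDigitVal ((c :: c' :: cs).getD k ' ')) cs.length]
  simp only [Nat.succ_sub_succ, List.getD_cons_succ, List.drop_succ_cons, List.getD_cons_zero,
    List.drop_zero, Nat.sub_zero, List.getLastD_cons]
  ring

theorem pvSA_eq_R (pref1 : List Int) (c : Char) (cs : List Char) :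
    pvSA pref1 (c :: cs) = pvR pref1 (c :: cs) := by
  induction cs generalizing c with
  | nil =>
      simp [pvSA, pvR, pvStrVal]
  | cons c' cs' ih =>
      rw [pvSA_cons, ih]
      simp only [pvR, List.length_cons]

theorem pv_parse_digits (cs : List Char) (h1 : cs ≠ []) (h2 : ∀ c ∈ cs, c.isDigit = true) :
    pvParseDigits? cs = some (pvStrVal cs) := by
  simp [pvParseDigits?, h1, List.all_eq_true.mpr h2]

theorem pv_parse_single (c : Char) (h : c.isDigit = true) :
    (pvParseDigits? [c]).getD 0 = pvDigitVal c := by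
  rw [pv_parse_digits [c] (by simp) (by simpa using h)]
  simp [pvStrVal]

theorem pv_foldl_range_congr (f g : Int → Nat → Int) (n : Nat)
    (h : ∀ a k, k < n → f a k = g a k) : ∀ init : Int,
    (List.range n).foldl f init = (List.range n).foldl g init := by
  induction n with
  | zero => intro init; simp
  | succ n ih =>
      intro init
      rw [List.range_succ, List.foldl_append, List.foldl_append,
        ih (fun a k hk => h a k (Nat.lt_succ_of_lt hk)) init]
      simp [h _ n (Nat.lt_succ_self n)]

theorem pv_foldl_range_add (g : Nat → Int) (n : Nat) : ∀ init : Int,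
    (List.range n).foldl (fun a k => a + g k) init = init + ∑ i ∈ Finset.range n, g i := by
  induction n with
  | zero => intro init; simp
  | succ n ih =>
      intro init
      rw [List.range_succ, List.foldl_append, ih, Finset.sum_range_succ]
      simp [add_assoc]

theorem pv_pyRange_zero_foldl (f : Int → Int → Int) (n : Nat) (init : Int) :
    (PySem.List.pyRange 0 (n : Int)).foldl f init
      = (List.range n).foldl (fun a (k : Nat) => f a (k : Int)) init := by
  rw [PySem.List.pyRange_one]
  have h : ((n : Int) - 0).toNat = n := by omega
  rw [h, List.foldl_map]
  simp only [zero_add]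

theorem pv_pySetD_natCast (xs : List Int) (n : Nat) (v : Int) (h : n < xs.length) :
    PySem.List.pySetD xs (n : Int) v = xs.set n v := by
  simp [PySem.List.pySetD, PySem.List.pySet?, PySem.List.pyIdx?, h]

-- The pow10 loop builds the table of powers of ten.
theorem pv_pow10_inv (D : Nat) : ∀ k, k ≤ D →
    (PySem.List.pyRange 1 ((k : Int) + 1)).foldl
      (fun acc t => PySem.List.pySetD acc t (PySem.List.pyGetD acc (t - 1) 0 * 10))
      (List.replicate (D + 1) (1 : Int))
    = (List.range (k + 1)).map (fun t => (10 : Int) ^ t) ++ List.replicate (D - k) 1 := by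
  intro k
  induction k with
  | zero =>
      intro _
      rw [PySem.List.pyRange_one_eq_nil (by norm_num)]
      simp [List.replicate_succ]
  | succ k ih =>
      intro hk
      have hk' : k ≤ D := Nat.le_of_succ_le hk
      have hcast : ((k + 1 : Nat) : Int) + 1 = ((k : Int) + 1) + 1 := by push_cast; ring
      rw [hcast, PySem.List.pyRange_one_succ_right (by omega), List.foldl_append, ih hk']
      set prev := (List.range (k + 1)).map (fun t => (10 : Int) ^ t) ++ List.replicate (D - k) 1
        with hprev
      have hlenprev : prev.length = D + 2 - 1 := by
        simp [hprev]
        omega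
      have hget : PySem.List.pyGetD prev ((k : Int) + 1 - 1) 0 = 10 ^ k := by
        have : (k : Int) + 1 - 1 = ((k : Nat) : Int) := by ring
        rw [this, PySem.List.pyGetD_natCast]
        rw [hprev, List.getD_append _ _ _ k (by simp), PySem.List.getD_map_range _ _ _ _ (by omega)]
      rw [List.foldl_cons, List.foldl_nil, hget]
      have hset : ((k : Int) + 1) = ((k + 1 : Nat) : Int) := by push_cast; ring
      rw [hset,
        pv_pySetD_natCast _ _ _ (by simp [hprev]; omega)]
      rw [hprev, List.set_append]
      have hlenmap : ((List.range (k + 1)).map (fun t => (10 : Int) ^ t)).length = k + 1 := by simp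
      rw [if_neg (by omega)]
      have hrep : D - k = (D - (k + 1)) + 1 := by omega
      rw [hlenmap, Nat.sub_self, hrep, List.replicate_succ, List.set_cons_zero]
      rw [List.range_succ (n := k + 1), List.map_append]
      simp [pow_succ, List.append_assoc]

-- closed form of the inner dig = 1..9 loop
theorem pv_inner (P Q r dj : Int) (h0 : 0 ≤ dj) (h9 : dj ≤ 9) :
    (PySem.List.pyRange 1 10).foldl
      (fun res dig => res + (P * dj + Q * (if dig < dj then 1 else 0)) * dig) r
    = r + 45 * P * dj + Q * pvT dj := by
  obtain ⟨T0, T1, T2, T3, T4, T5, T6, T7, T8, T9⟩ :=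
    (by decide : pvT 0 = 0 ∧ pvT 1 = 0 ∧ pvT 2 = 1 ∧ pvT 3 = 3 ∧ pvT 4 = 6 ∧ pvT 5 = 10
      ∧ pvT 6 = 15 ∧ pvT 7 = 21 ∧ pvT 8 = 28 ∧ pvT 9 = 36)
  rw [show PySem.List.pyRange 1 10 = [1, 2, 3, 4, 5, 6, 7, 8, 9] from by decide]
  simp only [List.foldl_cons, List.foldl_nil]
  interval_cases dj <;> norm_num [T0, T1, T2, T3, T4, T5, T6, T7, T8, T9] <;> ring

theorem pvACore_eq_SA (pref1 : List Int) (d : List Char)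
    (hd : ∀ c ∈ d, c.isDigit = true) (hne : d ≠ []) (hlen : d.length ≤ pref1.length) :
    pvACore d pref1 = pvSA pref1 d := by
  have hD : 0 < d.length := List.length_pos_of_ne_nil hne
  unfold pvACore
  dsimp only
  rw [pv_pow10_inv d.length d.length (le_refl _), Nat.sub_self, List.replicate_zero,
    List.append_nil]
  rw [pv_pyRange_zero_foldl]
  rw [pv_foldl_range_congr _
      (fun a k => a + (45 * pref1.getD (d.length - 1 - k) 0 * pvDigitVal (d.getD k ' ')
        + 10 ^ (d.length - 1 - k) * pvT (pvDigitVal (d.getD k ' ')))) d.length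
      (by
        intro a k hk
        have hmem : d.getD k ' ' ∈ d := by
          rw [List.getD_eq_getElem d ' ' hk]
          exact List.getElem_mem hk
        have hdig := hd _ hmem
        obtain ⟨hb0, hb9⟩ := pvDigitVal_bounds _ hdig
        have hx : (d.length : Int) - 1 - (k : Int) = ((d.length - 1 - k : Nat) : Int) := by
          omega
        simp only [PySem.List.pyGetD_natCast, pv_parse_single _ hdig, hx]
        rw [PySem.List.getD_map_range _ _ _ _ (by omega)]
        rw [pv_inner _ _ _ _ hb0 hb9]; ring),
    pv_foldl_range_add]
  have hcast1 : (d.length : Int) - 1 = ((d.length - 1 : Nat) : Int) := by omega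
  rw [hcast1, pv_pyRange_zero_foldl]
  rw [pv_foldl_range_congr _
      (fun a k => a + (pvStrVal (d.drop (k + 1)) + 1) * pvDigitVal (d.getD k ' '))
      (d.length - 1)
      (by
        intro a k hk
        have hkD : k < d.length := by omega
        have hmem : d.getD k ' ' ∈ d := by
          rw [List.getD_eq_getElem d ' ' hkD]
          exact List.getElem_mem hkD
        have hdig := hd _ hmem
        have hcond : (k : Int) + 1 < (d.length : Int) := by omega
        rw [if_pos hcond]
        rw [show (k : Int) + 1 = ((k + 1 : Nat) : Int) from by push_cast; ring,
          PySem.List.slice_from_natCast]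
        have hdrop : d.drop (k + 1) ≠ [] := by
          apply List.ne_nil_of_length_pos
          rw [List.length_drop]
          omega
        rw [pv_parse_digits _ hdrop (fun c hc => hd c (List.drop_subset _ _ hc))]
        simp only [PySem.List.pyGetD_natCast, pv_parse_single _ hdig, Option.getD_some]),
    pv_foldl_range_add]
  rw [PySem.List.pyGetD_neg_one d ' ' hne, pv_parse_single _ (hd _ (List.getLast_mem hne))]
  have hlast : d.getLast hne = d.getLastD '0' := by
    cases d with
    | nil => exact absurd rfl hne
    | cons c cs => rw [List.getLast_eq_getLastD, List.getLastD_cons]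
  rw [hlast]
  unfold pvSA
  ring

-- ===== VERDICT (by name: the statement is the Claim_ definition above) =====
theorem compute_res_spec : Claim_equal_compute_res := by
  intro num pref1 _ hpre
  obtain ⟨h0, hne, hlt⟩ := hpre
  unfold Spec_compute_res compute_res compute_res_alt
  have hto : PySem.Int.toChars num = Nat.toDigits 10 num.toNat := by
    unfold PySem.Int.toChars
    rw [if_neg (by omega)]
  rw [hto]
  have hd : ∀ c ∈ Nat.toDigits 10 num.toNat, c.isDigit = true := fun c hc =>
    Nat.isDigit_of_mem_toDigits (by norm_num) (le_refl 10) hc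
  have hdne : Nat.toDigits 10 num.toNat ≠ [] :=
    List.ne_nil_of_length_pos Nat.length_toDigits_pos
  have hlenpos : 0 < pref1.length := List.length_pos_of_ne_nil hne
  have hnum : num.toNat < 10 ^ pref1.length := by
    have h1 : (num.toNat : Int) = num := Int.toNat_of_nonneg h0
    have h2 : ((10 ^ pref1.length : Nat) : Int) = (10 : Int) ^ pref1.length := by push_cast; ring
    omega
  have hlen : (Nat.toDigits 10 num.toNat).length ≤ pref1.length :=
    (Nat.length_toDigits_le_iff (by norm_num) hlenpos).mpr hnum
  rw [pvACore_eq_SA pref1 _ hd hdne hlen, pvBCore_eq_R]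
  obtain ⟨c, cs, hcons⟩ := List.exists_cons_of_ne_nil hdne
  rw [hcons]
  exact pvSA_eq_R pref1 c cs
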